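-- pv_equiv track=rewrite | github.com/siditom-cs/reverta-aa2codon-calc | main.py | validate_mimic_codons
-- ===== SOURCE A (Python) =====
-- def validate_mimic_codons(codon_sequence):
--     codons = ['AAA', 'AAC', 'AAT', 'AAG', 'ACA', 'ACC', 'ACT', 'ACG', 'ATA', 'ATC', 'ATT', 'ATG', 'AGA', 'AGC', 'AGT', 'AGG', 'CAA', 'CAC', 'CAT', 'CAG', 'CCA', 'CCC', 'CCT', 'CCG', 'CTA', 'CTC', 'CTT', 'CTG', 'CGA', 'CGC', 'CGT', 'CGG', 'TAA', 'TAC', 'TAT', 'TAG', 'TCA', 'TCC', 'TCT', 'TCG', 'TTA', 'TTC', 'TTT', 'TTG', 'TGA', 'TGC', 'TGT', 'TGG', 'GAA', 'GAC', 'GAT', 'GAG', 'GCA', 'GCC', 'GCT', 'GCG', 'GTA', 'GTC', 'GTT', 'GTG', 'GGA', 'GGC', 'GGT', 'GGG', '<gap>']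
--     aas = "YMRS*WILNQFPHDCAGTEKV"
--     aa_masks = ['<mask_'+aa+'>' for aa in aas]
--     available_tokens = [*codons, *aa_masks]
--     token_list = codon_sequence.split(" ")
--
--     for token in token_list:
--         if not token in available_tokens:
--             return False, token
--     return True, None
-- ===== SOURCE B (Python) =====
-- AAS = 'YMRS*WILNQFPHDCAGTEKV'
--
-- def _ok_token(t):
--     if t == '<gap>':
--         return True
--     if len(t) == 3:
--         return all(c in 'ACGT' for c in t)
--     return len(t) == 8 and t.startswith('<mask_') and t.endswith('>') and t[6] in AAS
--
-- def validate_mimic_codons(codon_sequence):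
--     bad = next((t for t in codon_sequence.split(' ') if not _ok_token(t)), None)
--     return (bad is None, bad)
-- ===== Notes on version B (the rewrite author's own statement) =====
-- stated objective: simpler
-- what changed: Replaces the enumerated 86-token lookup table with a structural check per token (the gap literal, any 3-letter ACGT string, or an 8-char '<mask_X>' with X in the amino-acid alphabet), returning the first failing token via next() over a generator.
import Mathlib
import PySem

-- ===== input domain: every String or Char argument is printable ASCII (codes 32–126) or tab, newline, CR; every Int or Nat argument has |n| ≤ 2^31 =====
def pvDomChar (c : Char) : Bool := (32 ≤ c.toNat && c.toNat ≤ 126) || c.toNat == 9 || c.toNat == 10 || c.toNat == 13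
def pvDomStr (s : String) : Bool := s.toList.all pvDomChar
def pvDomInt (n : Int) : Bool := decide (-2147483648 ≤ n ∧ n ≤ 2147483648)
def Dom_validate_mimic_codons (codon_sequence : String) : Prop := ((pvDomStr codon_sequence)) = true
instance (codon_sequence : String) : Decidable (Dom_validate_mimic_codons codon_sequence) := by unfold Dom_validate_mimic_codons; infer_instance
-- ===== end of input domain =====

-- B replaces A's enumerated 86-token lookup table by a structural per-token check (simpler).


-- ===== PORT A =====
def pvCodons : List String := ["AAA", "AAC", "AAT", "AAG", "ACA", "ACC", "ACT", "ACG", "ATA", "ATC", "ATT", "ATG", "AGA", "AGC", "AGT", "AGG", "CAA", "CAC", "CAT", "CAG", "CCA", "CCC", "CCT", "CCG", "CTA", "CTC", "CTT", "CTG", "CGA", "CGC", "CGT", "CGG", "TAA", "TAC", "TAT", "TAG", "TCA", "TCC", "TCT", "TCG", "TTA", "TTC", "TTT", "TTG", "TGA", "TGC", "TGT", "TGG", "GAA", "GAC", "GAT", "GAG", "GCA", "GCC", "GCT", "GCG", "GTA", "GTC", "GTT", "GTG", "GGA", "GGC", "GGT", "GGG", "<gap>"]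
def pvAas : String := "YMRS*WILNQFPHDCAGTEKV"
-- '<mask_'+aa+'>' built on code points (Lean's String.append is opaque to the kernel)
def pvAaMasks : List String := pvAas.toList.map (fun aa => String.ofList (['<','m','a','s','k','_'] ++ [aa] ++ ['>']))
def pvAvailableTokens : List String := pvCodons ++ pvAaMasks

def pvLoopA : List String → Bool × Option String
  | [] => (true, none)
  | t :: ts => if pvAvailableTokens.contains t then pvLoopA ts else (false, some t)

def validate_mimic_codons (codon_sequence : String) : Bool × Option String :=
  pvLoopA ((PySem.Chars.splitOn codon_sequence.toList " ".toList).map String.ofList)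

-- ===== PORT B =====
-- structural check: gap literal, 3-letter ACGT codon, or 8-char '<mask_X>' with X an amino acid
def pvOkToken (t : String) : Bool :=
  if t == "<gap>" then true
  else if PySem.Str.len t == 3 then t.toList.all (fun c => PySem.Chars.isIn [c] "ACGT".toList)
  else PySem.Str.len t == 8 && PySem.Str.startswith t "<mask_" && PySem.Str.endswith t ">" &&
    (match PySem.Str.pyGet? t 6 with  -- t[6]: in range whenever reached (len t = 8)
     | some c => PySem.Chars.isIn [c] pvAas.toList
     | none => false)

def pvFindBad : List String → Option String
  | [] => none
  | t :: ts => if pvOkToken t then pvFindBad ts else some t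

def validate_mimic_codons_alt (codon_sequence : String) : Bool × Option String :=
  let bad := pvFindBad ((PySem.Chars.splitOn codon_sequence.toList " ".toList).map String.ofList)
  (bad.isNone, bad)

-- ===== PRECONDITION & SPEC =====
def Spec_validate_mimic_codons (codon_sequence : String) (out : Bool × Option String) : Prop := out = validate_mimic_codons_alt codon_sequence
instance (codon_sequence : String) (out : Bool × Option String) : Decidable (Spec_validate_mimic_codons codon_sequence out) := by unfold Spec_validate_mimic_codons; infer_instance

-- ===== CLAIM (what is proved, stated in full; the proofs are below) =====
def Claim_equal_validate_mimic_codons : Prop := ∀ (codon_sequence : String), Dom_validate_mimic_codons codon_sequence → Spec_validate_mimic_codons codon_sequence (validate_mimic_codons codon_sequence)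

-- ===== LEMMAS AND PROOFS =====
set_option maxRecDepth 4000

-- the available tokens as plain character lists (proof-side table)
def pvT : List (List Char) := [['A','A','A'], ['A','A','C'], ['A','A','T'], ['A','A','G'], ['A','C','A'], ['A','C','C'], ['A','C','T'], ['A','C','G'], ['A','T','A'], ['A','T','C'], ['A','T','T'], ['A','T','G'], ['A','G','A'], ['A','G','C'], ['A','G','T'], ['A','G','G'], ['C','A','A'], ['C','A','C'], ['C','A','T'], ['C','A','G'], ['C','C','A'], ['C','C','C'], ['C','C','T'], ['C','C','G'], ['C','T','A'], ['C','T','C'], ['C','T','T'], ['C','T','G'], ['C','G','A'], ['C','G','C'], ['C','G','T'], ['C','G','G'], ['T','A','A'], ['T','A','C'], ['T','A','T'], ['T','A','G'], ['T','C','A'], ['T','C','C'], ['T','C','T'], ['T','C','G'], ['T','T','A'], ['T','T','C'], ['T','T','T'], ['T','T','G'], ['T','G','A'], ['T','G','C'], ['T','G','T'], ['T','G','G'], ['G','A','A'], ['G','A','C'], ['G','A','T'], ['G','A','G'], ['G','C','A'], ['G','C','C'], ['G','C','T'], ['G','C','G'], ['G','T','A'], ['G','T','C'], ['G','T','T'],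 ['G','T','G'], ['G','G','A'], ['G','G','C'], ['G','G','T'], ['G','G','G'], ['<','g','a','p','>'], ['<','m','a','s','k','_','Y','>'], ['<','m','a','s','k','_','M','>'], ['<','m','a','s','k','_','R','>'], ['<','m','a','s','k','_','S','>'], ['<','m','a','s','k','_','*','>'], ['<','m','a','s','k','_','W','>'], ['<','m','a','s','k','_','I','>'], ['<','m','a','s','k','_','L','>'], ['<','m','a','s','k','_','N','>'], ['<','m','a','s','k','_','Q','>'], ['<','m','a','s','k','_','F','>'], ['<','m','a','s','k','_','P','>'], ['<','m','a','s','k','_','H','>'], ['<','m','a','s','k','_','D','>'], ['<','m','a','s','k','_','C','>'], ['<','m','a','s','k','_','A','>'], ['<','m','a','s','k','_','G','>'], ['<','m','a','s','k','_','T','>'], ['<','m','a','s','k','_','E','>'], ['<','m','a','s','k','_','K','>'], ['<','m','a','s','k','_','V','>']]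

theorem pvT_eq : pvAvailableTokens.map String.toList = pvT := by decide

theorem pv_beq_toList (s t : String) : (s == t) = (s.toList == t.toList) := by
  by_cases h : s = t
  · simp [h]
  · have h2 : s.toList ≠ t.toList := fun he => h (by
      have := congrArg String.ofList he
      simpa using this)
    simp [h, h2]

theorem pv_contains_map (l : List String) (t : String) :
    l.contains t = (l.map String.toList).contains t.toList := by
  induction l with
  | nil => rfl
  | cons s l ih =>
    simp only [List.map_cons, List.contains_cons, ih]
    rw [show (t == s) = (t.toList == s.toList) from pv_beq_toList t s]

theorem pv_contains_char (t : String) :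
    pvAvailableTokens.contains t = pvT.contains t.toList := by
  rw [pv_contains_map, pvT_eq]

theorem pv_ACGT : "ACGT".toList = ['A','C','G','T'] := by decide

theorem pv_AAS : pvAas.toList = ['Y','M','R','S','*','W','I','L','N','Q','F','P','H','D','C','A','G','T','E','K','V'] := by decide

theorem pv_isIn_singleton (c : Char) (l : List Char) :
    PySem.Chars.isIn [c] l = true ↔ c ∈ l := by
  rw [PySem.Chars.isIn_iff_infix]
  constructor
  · intro h; exact (List.singleton_sublist).mp h.sublist
  · intro h
    obtain ⟨s1, s2, rfl⟩ := List.append_of_mem h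
    exact ⟨s1, s2, by simp⟩

theorem pv_ok_of_mem : ∀ t ∈ pvAvailableTokens, pvOkToken t = true := by decide

theorem pv_mem_codon (a b c : Char) (ha : a ∈ ['A','C','G','T']) (hb : b ∈ ['A','C','G','T'])
    (hc : c ∈ ['A','C','G','T']) : pvT.contains [a, b, c] = true := by
  fin_cases ha <;> fin_cases hb <;> fin_cases hc <;> decide

theorem pv_mem_mask (c : Char)
    (hc : c ∈ ['Y','M','R','S','*','W','I','L','N','Q','F','P','H','D','C','A','G','T','E','K','V']) :
    pvT.contains ['<','m','a','s','k','_',c,'>'] = true := by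
  fin_cases hc <;> decide

theorem pv_token_eq (t : String) : pvAvailableTokens.contains t = pvOkToken t := by
  rcases h1 : pvAvailableTokens.contains t with _ | _
  · rcases h2 : pvOkToken t with _ | _
    · rfl
    · exfalso
      rw [pv_contains_char] at h1
      unfold pvOkToken at h2
      split_ifs at h2 with hg h3
      · have ht : t = "<gap>" := eq_of_beq hg
        rw [ht] at h1
        exact absurd h1 (by decide)
      · have hlen : t.toList.length = 3 := by
          have h3' : PySem.Str.len t = 3 := by simpa using h3
          simp only [PySem.Str.len_eq] at h3'
          exact_mod_cast h3'
        obtain ⟨a, b, c, habc⟩ : ∃ a b c, t.toList = [a, b, c] := by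
          match hl : t.toList, hlen with
          | [a, b, c], _ => exact ⟨a, b, c, rfl⟩
        rw [habc] at h2 h1
        simp only [List.all_cons, List.all_nil, Bool.and_true, Bool.and_eq_true] at h2
        obtain ⟨ha, hb, hc⟩ := h2
        rw [pv_ACGT] at ha hb hc
        rw [pv_mem_codon a b c ((pv_isIn_singleton _ _).mp ha)
          ((pv_isIn_singleton _ _).mp hb) ((pv_isIn_singleton _ _).mp hc)] at h1
        cases h1
      · simp only [Bool.and_eq_true, beq_iff_eq] at h2
        obtain ⟨⟨⟨hlen, hpre⟩, hsuf⟩, hget⟩ := h2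
        have hlen' : t.toList.length = 8 := by
          simp only [PySem.Str.len_eq] at hlen
          exact_mod_cast hlen
        have hpre' : ['<','m','a','s','k','_'] <+: t.toList := by
          have h := (PySem.Chars.startswith_iff (s := t.toList) (p := "<mask_".toList)).mp
            (by simpa using hpre)
          simpa using h
        obtain ⟨rest, hrest⟩ := hpre'
        obtain ⟨x, y, hxy⟩ : ∃ x y, rest = [x, y] := by
          have hrlen : rest.length = 2 := by
            rw [← hrest] at hlen'; simp at hlen'; omega
          match hr : rest, hrlen with
          | [x, y], _ => exact ⟨x, y, rfl⟩
        subst hxy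
        have hlist : t.toList = ['<','m','a','s','k','_',x,y] := by rw [← hrest]; rfl
        have hy : y = '>' := by
          have hsuf' : ['>'] <:+ t.toList := by
            have h := (PySem.Chars.endswith_iff (s := t.toList) (p := ">".toList)).mp
              (by simpa using hsuf)
            simpa using h
          obtain ⟨s1, hs1⟩ := hsuf'
          have hgl : t.toList.getLast? = some '>' := by rw [← hs1]; simp
          rw [hlist] at hgl; simp at hgl; exact hgl
        have hg6 : PySem.Str.pyGet? t 6 = some x := by
          simp only [PySem.Str.pyGet?_eq, PySem.Chars.pyGet?_eq_listPyGet?]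
          rw [show (6 : Int) = ((6 : Nat) : Int) from rfl, PySem.List.pyGet?_natCast]
          simp [hlist]
        rw [hg6] at hget
        have hx := (pv_isIn_singleton _ _).mp hget
        rw [pv_AAS] at hx
        rw [hy] at hlist
        rw [hlist, pv_mem_mask x hx] at h1
        cases h1
  · have hmem : t ∈ pvAvailableTokens := by simpa using h1
    exact (pv_ok_of_mem t hmem).symm

theorem pv_loop_eq (ts : List String) :
    pvLoopA ts = ((pvFindBad ts).isNone, pvFindBad ts) := by
  induction ts with
  | nil => rfl
  | cons t ts ih =>
    simp only [pvLoopA, pvFindBad, pv_token_eq t]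
    rcases pvOkToken t with _ | _ <;> simp [ih]

-- ===== VERDICT (by name: the statement is the Claim_ definition above) =====
theorem validate_mimic_codons_spec : Claim_equal_validate_mimic_codons := by
  intro s _
  unfold Spec_validate_mimic_codons validate_mimic_codons validate_mimic_codons_alt
  exact pv_loop_eq _
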